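-- pv_equiv track=rewrite | github.com/SebastianDuda0106/prg-basics | 07-Arrays/programs/Myarrays.py | arrdiff
-- ===== SOURCE A (Python) =====
-- def arrdiff(arr):
--     larg=0
--     smal=0
--     for i in arr:
--         if larg<int(i):
--             larg=int(i)
--         if smal>int(i):
--             smal=int(i)
--     return (larg-smal)
-- ===== SOURCE B (Python) =====
-- def arrdiff(arr):
--     s = sorted([int(i) for i in arr] + [0])
--     return s[-1] - s[0]
-- ===== Notes on version B (the rewrite author's own statement) =====
-- stated objective: alternative
-- what changed: Replaces the fused single-pass extrema-accumulator loop with sort-then-endpoints: append the 0 baseline, sort, and subtract the first from the last element.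
import Mathlib
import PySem

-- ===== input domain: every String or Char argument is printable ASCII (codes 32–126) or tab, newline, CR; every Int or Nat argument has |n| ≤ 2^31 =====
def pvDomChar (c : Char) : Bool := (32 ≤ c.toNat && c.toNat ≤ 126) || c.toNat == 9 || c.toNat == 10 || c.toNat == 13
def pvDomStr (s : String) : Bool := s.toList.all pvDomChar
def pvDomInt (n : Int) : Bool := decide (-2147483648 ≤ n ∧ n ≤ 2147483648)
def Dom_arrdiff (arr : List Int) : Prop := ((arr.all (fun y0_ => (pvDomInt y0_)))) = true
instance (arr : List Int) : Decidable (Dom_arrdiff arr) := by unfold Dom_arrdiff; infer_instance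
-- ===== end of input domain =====

-- B replaces A's single fused extrema-accumulator loop with sort-then-endpoints: sort arr with the 0 baseline appended and subtract the first element from the last (alternative decomposition, not faster).


-- ===== PORT A =====
def arrdiff (arr : List Int) : Int :=
  let st := arr.foldl
    (fun (p : Int × Int) i =>
      (if p.1 < i then i else p.1, if p.2 > i then i else p.2))
    (0, 0)
  st.1 - st.2

-- ===== PORT B =====
def arrdiff_alt (arr : List Int) : Int :=
  let s := PySem.List.sorted (arr.map (fun i => i) ++ [0]) (fun x => x) false
  -- s is nonempty by construction, so both pyGet? calls return some; .getD 0 only totalises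
  (PySem.List.pyGet? s (-1)).getD 0 - (PySem.List.pyGet? s 0).getD 0

-- ===== PRECONDITION & SPEC =====
def Spec_arrdiff (arr : List Int) (out : Int) : Prop := out = arrdiff_alt arr
instance (arr : List Int) (out : Int) : Decidable (Spec_arrdiff arr out) := by unfold Spec_arrdiff; infer_instance

-- ===== CLAIM (what is proved, stated in full; the proofs are below) =====
def Claim_equal_arrdiff : Prop := ∀ (arr : List Int), Dom_arrdiff arr → Spec_arrdiff arr (arrdiff arr)

-- ===== LEMMAS AND PROOFS =====

-- A's loop step on each component is just max / min.
theorem arrdiff_fold_pair (t : List Int) (l s : Int) :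
    t.foldl (fun (p : Int × Int) i =>
      (if p.1 < i then i else p.1, if p.2 > i then i else p.2)) (l, s)
    = (t.foldl max l, t.foldl min s) := by
  induction t generalizing l s with
  | nil => rfl
  | cons x t ih =>
    have h1 : (if l < x then x else l) = max l x := by rw [max_def]; split_ifs <;> omega
    have h2 : (if s > x then x else s) = min s x := by rw [min_def]; split_ifs <;> omega
    simp only [List.foldl_cons, h1, h2, ih]

theorem foldl_min_mem (t : List Int) (a : Int) : t.foldl min a ∈ a :: t := by
  induction t generalizing a with
  | nil => simp
  | cons x t ih =>
    simp only [List.foldl_cons]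
    rcases List.mem_cons.mp (ih (min a x)) with h | h
    · rcases le_total a x with hx | hx
      · rw [min_eq_left hx] at h ⊢; simp [h]
      · rw [min_eq_right hx] at h ⊢; simp [h]
    · simp [h]

theorem foldl_min_le (t : List Int) (a : Int) :
    t.foldl min a ≤ a ∧ ∀ x ∈ t, t.foldl min a ≤ x := by
  induction t generalizing a with
  | nil => simp
  | cons x t ih =>
    obtain ⟨h1, h2⟩ := ih (min a x)
    refine ⟨le_trans h1 (min_le_left _ _), ?_⟩
    intro y hy
    rcases List.mem_cons.mp hy with rfl | hy
    · exact le_trans h1 (min_le_right _ _)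
    · exact h2 y hy

theorem foldl_max_mem (t : List Int) (a : Int) : t.foldl max a ∈ a :: t := by
  induction t generalizing a with
  | nil => simp
  | cons x t ih =>
    simp only [List.foldl_cons]
    rcases List.mem_cons.mp (ih (max a x)) with h | h
    · rcases le_total a x with hx | hx
      · rw [max_eq_right hx] at h ⊢; simp [h]
      · rw [max_eq_left hx] at h ⊢; simp [h]
    · simp [h]

theorem foldl_max_ge (t : List Int) (a : Int) :
    a ≤ t.foldl max a ∧ ∀ x ∈ t, x ≤ t.foldl max a := by
  induction t generalizing a with
  | nil => simp
  | cons x t ih =>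
    obtain ⟨h1, h2⟩ := ih (max a x)
    refine ⟨le_trans (le_max_left _ _) h1, ?_⟩
    intro y hy
    rcases List.mem_cons.mp hy with rfl | hy
    · exact le_trans (le_max_right _ _) h1
    · exact h2 y hy

theorem pairwise_le_getLast (s : List Int) (hp : s.Pairwise (· ≤ ·)) (hne : s ≠ []) :
    ∀ y ∈ s, y ≤ s.getLast hne := by
  induction s with
  | nil => simp at hne
  | cons x t ih =>
    intro y hy
    cases t with
    | nil => simp at hy; simp [hy, List.getLast]
    | cons z u =>
      rw [List.getLast_cons (by simp)]
      rcases List.mem_cons.mp hy with rfl | hy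
      · exact le_trans (List.rel_of_pairwise_cons hp (List.getLast_mem _))
          (le_refl _)
      · exact ih (List.Pairwise.of_cons hp) (by simp) y hy

-- ===== VERDICT (by name: the statement is the Claim_ definition above) =====
theorem arrdiff_spec : Claim_equal_arrdiff := by
  intro arr _
  unfold Spec_arrdiff arrdiff arrdiff_alt
  simp only [arrdiff_fold_pair, List.map_id_fun', id]
  set l : List Int := arr ++ [0] with hl
  set s : List Int := PySem.List.sorted l (fun x => x) false with hs
  have hperm : s.Perm l := PySem.List.sorted_perm l (fun x => x) false
  have hmem : ∀ x : Int, x ∈ l ↔ x ∈ (0 : Int) :: arr := by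
    intro x; simp [hl, List.mem_append, or_comm]
  have hne : s ≠ [] := by
    intro h
    have := (PySem.List.sorted_eq_nil_iff (xs := l) (key := fun x => x) (rev := false)).mp h
    simp [hl] at this
  -- head of s = foldl min 0 arr
  obtain ⟨h0, t0, hcons⟩ := List.exists_cons_of_ne_nil hne
  have hheadle : ∀ y ∈ l, h0 ≤ y :=
    PySem.List.key_head_sorted_le (xs := l) (key := fun x => x) (by rw [← hs, hcons])
  have hh0mem : h0 ∈ l := hperm.mem_iff.mp (by simp [hcons])
  have hm := foldl_min_le arr 0
  have hmmem : arr.foldl min 0 ∈ l := (hmem _).mpr (foldl_min_mem arr 0)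
  have hhead_eq : h0 = arr.foldl min 0 := by
    apply le_antisymm (hheadle _ hmmem)
    rcases List.mem_cons.mp ((hmem _).mp hh0mem) with h | h
    · rw [h]; exact hm.1
    · exact hm.2 _ h
  -- last of s = foldl max 0 arr
  have hpair : s.Pairwise (· ≤ ·) := by
    have := PySem.List.sorted_pairwise (xs := l) (key := fun x => x)
    simpa [← hs] using this
  have hlastge : ∀ y ∈ s, y ≤ s.getLast hne := pairwise_le_getLast s hpair hne
  have hlastmem : s.getLast hne ∈ l := hperm.mem_iff.mp (List.getLast_mem hne)
  have hM := foldl_max_ge arr 0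
  have hMmem : arr.foldl max 0 ∈ l := (hmem _).mpr (foldl_max_mem arr 0)
  have hlast_eq : s.getLast hne = arr.foldl max 0 := by
    apply le_antisymm
    · rcases List.mem_cons.mp ((hmem _).mp hlastmem) with h | h
      · rw [h]; exact hM.1
      · exact hM.2 _ h
    · exact hlastge _ (hperm.mem_iff.mpr hMmem)
  have hg1 : PySem.List.pyGet? s (-1) = some (s.getLast hne) := by
    rw [PySem.List.pyGet?_neg_one, List.getLast?_eq_some_getLast]
  have hg0 : PySem.List.pyGet? s 0 = some h0 := by
    rw [hcons]; exact PySem.List.pyGet?_zero_cons _ _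
  rw [hg1, hg0, Option.getD_some, Option.getD_some, hlast_eq, hhead_eq]
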